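-- pv_equiv track=rewrite | github.com/pkuserc/MDS | mds_dialogue_eval.py | build_context_block_from_prompt
-- ===== SOURCE A (Python) =====
-- def build_context_block_from_prompt(prompt_str: str) -> str:
--     """
--     Convert a Llama 3 prompt with <|start_header_id|> / <|eot_id|> markers
--     into a readable multi-turn dialogue block.
--
--     Output format:
--     User: ...
--     Assistant: ...
--     System: ...
--     """
--     prompt_str = prompt_str or ""
--     if "<|start_header_id|>" not in prompt_str:
--         return prompt_str.strip()
--
--     parts = prompt_str.split("<|start_header_id|>")
--     lines = []
--     for part in parts[1:]:
--         # Example part format: 'user<|end_header_id|>\n\ncontent<|eot_id|>...'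
--         if "<|end_header_id|>" not in part:
--             continue
--         role_chunk, rest = part.split("<|end_header_id|>", 1)
--         role = role_chunk.strip()
--         if "<|eot_id|>" in rest:
--             content, _ = rest.split("<|eot_id|>", 1)
--         else:
--             content = rest
--         content = content.strip()
--         if not content:
--             continue
--         if role == "user":
--             prefix = "User"
--         elif role == "assistant":
--             prefix = "Assistant"
--         elif role == "system":
--             prefix = "System"
--         else:
--             prefix = role.capitalize()
--         lines.append(f"{prefix}: {content}")
--     return "\n".join(lines)
-- ===== SOURCE B (Python) =====
-- _START = "<|start_header_id|>"
-- _END = "<|end_header_id|>"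
-- _EOT = "<|eot_id|>"
-- _PREFIXES = {"user": "User", "assistant": "Assistant", "system": "System"}
--
--
-- def _emit(lines, role, buf):
--     content = "".join(buf).strip()
--     if content:
--         prefix = _PREFIXES.get(role, role.capitalize())
--         lines.append(prefix + ": " + content)
--
--
-- def build_context_block_from_prompt(prompt_str: str) -> str:
--     """Single linear character scan driven by a three-state automaton
--     (0: discarding, 1: reading a role name, 2: reading turn content)."""
--     prompt_str = prompt_str or ""
--     lines = []
--     mode = 0
--     role = ""
--     buf = []
--     saw_header = False
--     i, n = 0, len(prompt_str)
--     while i < n: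
--         if prompt_str.startswith(_START, i):
--             if mode == 2:
--                 _emit(lines, role, buf)
--             mode, buf, saw_header = 1, [], True
--             i += len(_START)
--         elif mode == 1 and prompt_str.startswith(_END, i):
--             role, mode, buf = "".join(buf).strip(), 2, []
--             i += len(_END)
--         elif mode == 2 and prompt_str.startswith(_EOT, i):
--             _emit(lines, role, buf)
--             mode, buf = 0, []
--             i += len(_EOT)
--         else:
--             if mode:
--                 buf.append(prompt_str[i])
--             i += 1
--     if mode == 2:
--         _emit(lines, role, buf)
--     if not saw_header:
--         return prompt_str.strip()
--     return "\n".join(lines)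
-- ===== Notes on version B (the rewrite author's own statement) =====
-- stated objective: alternative
-- what changed: A parses in stages by splitting the whole prompt on '<|start_header_id|>' and then re-splitting each part on '<|end_header_id|>' / '<|eot_id|>'; B never splits: it makes one left-to-right character scan over the prompt driven by a three-state automaton (discarding / reading role / reading content) that emits a formatted line each time a turn's content closes.
import Mathlib
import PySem

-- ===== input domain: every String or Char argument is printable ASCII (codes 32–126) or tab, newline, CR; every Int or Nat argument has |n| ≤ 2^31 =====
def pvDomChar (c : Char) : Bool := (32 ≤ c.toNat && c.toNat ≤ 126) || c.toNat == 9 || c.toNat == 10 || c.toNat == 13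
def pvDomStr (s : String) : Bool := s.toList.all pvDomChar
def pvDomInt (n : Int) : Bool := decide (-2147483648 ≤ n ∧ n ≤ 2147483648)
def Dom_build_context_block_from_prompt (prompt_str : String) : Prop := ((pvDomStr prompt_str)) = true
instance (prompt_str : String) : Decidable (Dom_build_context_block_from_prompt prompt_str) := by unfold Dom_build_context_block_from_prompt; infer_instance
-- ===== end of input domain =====

-- B replaces A's staged split("<|start_header_id|>") / per-part split parsing by a single
-- left-to-right character scan driven by a three-state automaton (objective: alternative).

-- ===== PORT A =====
def pvSTART : List Char := "<|start_header_id|>".toList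
def pvEND : List Char := "<|end_header_id|>".toList
def pvEOT : List Char := "<|eot_id|>".toList

-- Python str.capitalize(), exact on ASCII: first char uppercased, the rest lowercased
def pyCapitalize (s : List Char) : List Char :=
  match s with
  | [] => []
  | c :: t => PySem.Chars.upperChar c :: PySem.Chars.lower t

-- the body of A's `for part in parts[1:]` loop, on the `lines` accumulator
def pvStepA (lines : List (List Char)) (part : List Char) : List (List Char) :=
  if PySem.Chars.isIn pvEND part = false then lines
  else
    match PySem.Chars.splitOnMax part pvEND 1 with
    | role_chunk :: rest :: _ =>
      let role := PySem.Chars.strip role_chunk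
      let content :=
        if PySem.Chars.isIn pvEOT rest then
          match PySem.Chars.splitOnMax rest pvEOT 1 with
          | content :: _ => content
          | [] => rest
        else rest
      let content := PySem.Chars.strip content
      if content = [] then lines
      else
        let pfx :=
          if role = "user".toList then "User".toList
          else if role = "assistant".toList then "Assistant".toList
          else if role = "system".toList then "System".toList
          else pyCapitalize role
        lines ++ [pfx ++ ": ".toList ++ content]
    | _ => lines

def build_context_block_from_prompt (prompt_str : String) : String :=
  let p := prompt_str.toList
  if PySem.Chars.isIn pvSTART p = false then String.ofList (PySem.Chars.strip p)
  else
    let parts := PySem.Chars.splitOn p pvSTART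
    let lines := (parts.drop 1).foldl pvStepA []
    String.ofList (PySem.Chars.join "\n".toList lines)

-- ===== PORT B =====
def pvPrefixes : PySem.Dict (List Char) (List Char) :=
  PySem.Dict.mk [("user".toList, "User".toList),
                 ("assistant".toList, "Assistant".toList),
                 ("system".toList, "System".toList)]

-- Source B's _emit: append "Prefix: content" to lines when the stripped content is non-empty
def pvEmit (lines : List (List Char)) (role buf : List Char) : List (List Char) :=
  let content := PySem.Chars.strip buf
  if content = [] then lines
  else lines ++ [((pvPrefixes.get? role).getD (pyCapitalize role)) ++ ": ".toList ++ content]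

-- Source B's while loop: one character scan; mode 0 = discarding, 1 = reading a role, 2 = reading content
def scanB (l : List Char) (mode : Nat) (role buf : List Char) (saw : Bool)
    (lines : List (List Char)) : List (List Char) × Bool :=
  if hl : l = [] then (if mode = 2 then pvEmit lines role buf else lines, saw)
  else if pvSTART <+: l then
    scanB (l.drop pvSTART.length) 1 role [] true (if mode = 2 then pvEmit lines role buf else lines)
  else if mode = 1 ∧ pvEND <+: l then
    scanB (l.drop pvEND.length) 2 (PySem.Chars.strip buf) [] saw lines
  else if mode = 2 ∧ pvEOT <+: l then
    scanB (l.drop pvEOT.length) 0 role [] saw (pvEmit lines role buf)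
  else
    scanB l.tail mode role (if mode ≠ 0 then buf ++ [l.head hl] else buf) saw lines
termination_by l.length
decreasing_by
  all_goals
    (first
      | (simp only [List.length_drop]
         have hlp : 0 < l.length := List.length_pos_iff.mpr hl
         have h19 : 0 < pvSTART.length := by decide
         have h17 : 0 < pvEND.length := by decide
         have h10 : 0 < pvEOT.length := by decide
         omega)
      | (simp only [List.length_tail]
         have hlp : 0 < l.length := List.length_pos_iff.mpr hl
         omega))

def build_context_block_from_prompt_alt (prompt_str : String) : String :=
  let p := prompt_str.toList
  let res := scanB p 0 [] [] false []
  if res.2 = false then String.ofList (PySem.Chars.strip p)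
  else String.ofList (PySem.Chars.join "\n".toList res.1)

-- ===== PRECONDITION & SPEC =====
def Spec_build_context_block_from_prompt (prompt_str : String) (out : String) : Prop := out = build_context_block_from_prompt_alt prompt_str
instance (prompt_str : String) (out : String) : Decidable (Spec_build_context_block_from_prompt prompt_str out) := by unfold Spec_build_context_block_from_prompt; infer_instance

-- ===== CLAIM (what is proved, stated in full; the proofs are below) =====
def Claim_equal_build_context_block_from_prompt : Prop := ∀ (prompt_str : String), Dom_build_context_block_from_prompt prompt_str → Spec_build_context_block_from_prompt prompt_str (build_context_block_from_prompt prompt_str)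

-- ===== LEMMAS AND PROOFS =====

-- the three Llama markers
def pvMarkers : List (List Char) := [pvSTART, pvEND, pvEOT]

-- no marker occurrence can overlap another: a proper suffix of a marker is never a prefix
-- of (or extended by) a marker — a finite check over the three literal strings
lemma pv_noOverlap : ∀ X ∈ pvMarkers, ∀ Y ∈ pvMarkers, ∀ m : Nat, m < X.length → 0 < m →
    ¬ X.drop m <+: Y ∧ ¬ Y <+: X.drop m := by decide

-- a prefix of an append is a prefix of the left part, or extends it
lemma pv_prefix_append {l a b : List Char} (h : l <+: a ++ b) :
    l <+: a ∨ (a <+: l ∧ l.drop a.length <+: b) := by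
  obtain ⟨w, hw⟩ := h
  rcases List.append_eq_append_iff.mp hw with ⟨c, hc1, hc2⟩ | ⟨c, hc1, hc2⟩
  · left; exact ⟨c, hc1.symm⟩
  · subst hc1
    right
    refine ⟨List.prefix_append a c, ?_⟩
    simp only [List.drop_left]
    exact ⟨w, hc2.symm⟩

-- inside text t that contains no occurrence of marker X, and followed by a marker boundary,
-- X never matches
lemma pv_head_no_match {X : List Char} (hX : X ∈ pvMarkers) {t u : List Char}
    (ht : ¬ X <:+: t) (hne : t ≠ [])
    (hu : u = [] ∨ ∃ M ∈ pvMarkers, ∃ r, u = M ++ r) : ¬ X <+: (t ++ u) := by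
  intro h
  rcases pv_prefix_append h with h1 | ⟨h2, h3⟩
  · exact ht h1.isInfix
  · have hlen : t.length ≤ X.length := h2.length_le
    have hpos : 0 < t.length := List.length_pos_iff.mpr hne
    by_cases heq : t.length = X.length
    · have htX : t = X := h2.eq_of_length heq
      exact ht (by rw [htX])
    · have hlt : t.length < X.length := lt_of_le_of_ne hlen heq
      rcases hu with rfl | ⟨M, hM, r, rfl⟩
      · have hn : X.drop t.length = [] := List.prefix_nil.mp h3
        have := congrArg List.length hn
        simp only [List.length_drop, List.length_nil] at this
        omega
      · rcases pv_prefix_append h3 with h4 | ⟨h4, _⟩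
        · exact (pv_noOverlap X hX M hM t.length hlt hpos).1 h4
        · exact (pv_noOverlap X hX M hM t.length hlt hpos).2 h4

-- ---- mode-local text lemmas: the scan walks char by char through marker-free text ----

lemma pv_scanB_nil (mode : Nat) (role buf : List Char) (saw : Bool) (lines : List (List Char)) :
    scanB [] mode role buf saw lines =
      (if mode = 2 then pvEmit lines role buf else lines, saw) := by
  rw [scanB]
  simp

-- one plain character is consumed when no branch fires
lemma pv_scan_char (c : Char) (t : List Char) (mode : Nat) (role buf : List Char) (saw : Bool)
    (lines : List (List Char)) (h1 : ¬ pvSTART <+: c :: t)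
    (h2 : ¬ (mode = 1 ∧ pvEND <+: c :: t)) (h3 : ¬ (mode = 2 ∧ pvEOT <+: c :: t)) :
    scanB (c :: t) mode role buf saw lines =
      scanB t mode role (if mode ≠ 0 then buf ++ [c] else buf) saw lines := by
  rw [scanB]
  rw [dif_neg (List.cons_ne_nil c t), if_neg h1, if_neg h2, if_neg h3]
  rfl

lemma pv_scan0_text {t u : List Char} (ht : ¬ pvSTART <:+: t)
    (hu : u = [] ∨ ∃ M ∈ pvMarkers, ∃ r, u = M ++ r) (role buf : List Char) (saw : Bool)
    (lines : List (List Char)) :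
    scanB (t ++ u) 0 role buf saw lines = scanB u 0 role buf saw lines := by
  induction t with
  | nil => simp
  | cons c t' ih =>
    have hnp : ¬ pvSTART <+: (c :: t') ++ u :=
      pv_head_no_match (by decide) ht (List.cons_ne_nil c t') hu
    rw [List.cons_append,
      pv_scan_char c (t' ++ u) 0 role buf saw lines (by simpa using hnp)
        (by simp) (by simp)]
    simp only [if_neg (by simp : ¬ (0 : Nat) ≠ 0)]
    exact ih (fun hi => ht (List.infix_cons hi))

lemma pv_scan1_text {t u : List Char} (h1 : ¬ pvSTART <:+: t) (h2 : ¬ pvEND <:+: t)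
    (hu : u = [] ∨ ∃ M ∈ pvMarkers, ∃ r, u = M ++ r) (role buf : List Char) (saw : Bool)
    (lines : List (List Char)) :
    scanB (t ++ u) 1 role buf saw lines = scanB u 1 role (buf ++ t) saw lines := by
  induction t generalizing buf with
  | nil => simp
  | cons c t' ih =>
    have hnpS : ¬ pvSTART <+: (c :: t') ++ u :=
      pv_head_no_match (by decide) h1 (List.cons_ne_nil c t') hu
    have hnpE : ¬ pvEND <+: (c :: t') ++ u :=
      pv_head_no_match (by decide) h2 (List.cons_ne_nil c t') hu
    rw [List.cons_append,
      pv_scan_char c (t' ++ u) 1 role buf saw lines (by simpa using hnpS)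
        (fun h => hnpE h.2) (by simp)]
    simp only [if_pos (by simp : (1 : Nat) ≠ 0)]
    rw [ih (fun hi => h1 (List.infix_cons hi))
        (fun hi => h2 (List.infix_cons hi)) (buf ++ [c])]
    simp

lemma pv_scan2_text {t u : List Char} (h1 : ¬ pvSTART <:+: t) (h2 : ¬ pvEOT <:+: t)
    (hu : u = [] ∨ ∃ M ∈ pvMarkers, ∃ r, u = M ++ r) (role buf : List Char) (saw : Bool)
    (lines : List (List Char)) :
    scanB (t ++ u) 2 role buf saw lines = scanB u 2 role (buf ++ t) saw lines := by
  induction t generalizing buf with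
  | nil => simp
  | cons c t' ih =>
    have hnpS : ¬ pvSTART <+: (c :: t') ++ u :=
      pv_head_no_match (by decide) h1 (List.cons_ne_nil c t') hu
    have hnpT : ¬ pvEOT <+: (c :: t') ++ u :=
      pv_head_no_match (by decide) h2 (List.cons_ne_nil c t') hu
    rw [List.cons_append,
      pv_scan_char c (t' ++ u) 2 role buf saw lines (by simpa using hnpS)
        (by simp) (fun h => hnpT h.2)]
    simp only [if_pos (by simp : (2 : Nat) ≠ 0)]
    rw [ih (fun hi => h1 (List.infix_cons hi))
        (fun hi => h2 (List.infix_cons hi)) (buf ++ [c])]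
    simp

-- ---- one step over each marker ----

lemma pv_scan_start_step (x : List Char) (mode : Nat) (role buf : List Char) (saw : Bool)
    (lines : List (List Char)) :
    scanB (pvSTART ++ x) mode role buf saw lines =
      scanB x 1 role [] true (if mode = 2 then pvEmit lines role buf else lines) := by
  rw [scanB]
  rw [dif_neg (by simp [pvSTART] : ¬ pvSTART ++ x = [])]
  rw [if_pos (List.prefix_append _ _)]
  rw [List.drop_left]

lemma pv_scan_end_step (x : List Char) (role buf : List Char) (saw : Bool)
    (lines : List (List Char)) :
    scanB (pvEND ++ x) 1 role buf saw lines =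
      scanB x 2 (PySem.Chars.strip buf) [] saw lines := by
  have hS : ¬ pvSTART <+: pvEND ++ x := by
    intro h
    rcases pv_prefix_append h with h1 | ⟨h1, _⟩
    · exact (by decide : ¬ pvSTART <+: pvEND) h1
    · exact (by decide : ¬ pvEND <+: pvSTART) h1
  rw [scanB]
  rw [dif_neg (by simp [pvEND] : ¬ pvEND ++ x = [])]
  rw [if_neg hS]
  rw [if_pos ⟨rfl, List.prefix_append _ _⟩]
  rw [List.drop_left]

lemma pv_scan_eot_step (x : List Char) (role buf : List Char) (saw : Bool)
    (lines : List (List Char)) :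
    scanB (pvEOT ++ x) 2 role buf saw lines =
      scanB x 0 role [] saw (pvEmit lines role buf) := by
  have hS : ¬ pvSTART <+: pvEOT ++ x := by
    intro h
    rcases pv_prefix_append h with h1 | ⟨h1, _⟩
    · exact (by decide : ¬ pvSTART <+: pvEOT) h1
    · exact (by decide : ¬ pvEOT <+: pvSTART) h1
  rw [scanB]
  rw [dif_neg (by simp [pvEOT] : ¬ pvEOT ++ x = [])]
  rw [if_neg hS]
  rw [if_neg (by simp : ¬ ((2 : Nat) = 1 ∧ pvEND <+: pvEOT ++ x))]
  rw [if_pos ⟨rfl, List.prefix_append _ _⟩]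
  rw [List.drop_left]

-- in mode 1 with an empty buffer the carried role is dead (it is overwritten before any emit)
lemma pv_scan1_role_irrel (l : List Char) (role role' buf : List Char) (saw : Bool)
    (lines : List (List Char)) :
    scanB l 1 role buf saw lines = scanB l 1 role' buf saw lines := by
  suffices h : ∀ (n : Nat) (l : List Char), l.length ≤ n → ∀ (role role' buf : List Char)
      (saw : Bool) (lines : List (List Char)),
      scanB l 1 role buf saw lines = scanB l 1 role' buf saw lines from
    h l.length l le_rfl role role' buf saw lines
  intro n
  induction n with
  | zero =>
    intro l hl role role' buf saw lines
    have : l = [] := List.length_eq_zero_iff.mp (Nat.le_zero.mp hl)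
    subst this
    rw [pv_scanB_nil, pv_scanB_nil]
    simp
  | succ k ih =>
    intro l hl role role' buf saw lines
    by_cases hnil : l = []
    · subst hnil; rw [pv_scanB_nil, pv_scanB_nil]; simp
    · have hlp : 0 < l.length := List.length_pos_iff.mpr hnil
      rw [scanB, dif_neg hnil]
      conv_rhs => rw [scanB, dif_neg hnil]
      by_cases hS : pvSTART <+: l
      · rw [if_pos hS, if_pos hS]
        exact ih _ (by
          have : 0 < pvSTART.length := by decide
          simp only [List.length_drop]; omega) _ _ _ _ _
      · rw [if_neg hS, if_neg hS]
        by_cases hE : (1 : Nat) = 1 ∧ pvEND <+: l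
        · rw [if_pos hE, if_pos hE]
        · rw [if_neg hE, if_neg hE,
            if_neg (by simp : ¬ ((1 : Nat) = 2 ∧ pvEOT <+: l)),
            if_neg (by simp : ¬ ((1 : Nat) = 2 ∧ pvEOT <+: l))]
          exact ih _ (by simp only [List.length_tail]; omega) _ _ _ _ _

-- ---- find-based decomposition of the first occurrence ----

lemma pv_find_decomp {sep : List Char} (hsep : sep ≠ []) {t : List Char}
    (h : 0 ≤ PySem.Chars.find t sep) :
    t = t.take (PySem.Chars.find t sep).toNat ++ sep ++
        t.drop ((PySem.Chars.find t sep).toNat + sep.length) ∧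
      ¬ sep <:+: t.take (PySem.Chars.find t sep).toNat := by
  obtain ⟨hpre, hmin⟩ := PySem.Chars.find_spec h
  set i := (PySem.Chars.find t sep).toNat with hidef
  have hi_le : i ≤ t.length := by
    have := PySem.Chars.find_le_length t sep
    omega
  obtain ⟨w, hw⟩ := hpre
  constructor
  · have hdrop : t.drop (i + sep.length) = w := by
      have h1 : t.drop (i + sep.length) = (t.drop i).drop sep.length := by
        rw [List.drop_drop, Nat.add_comm]
      rw [h1, ← hw, List.drop_left]
    rw [hdrop, List.append_assoc, hw, List.take_append_drop]
  · intro hinf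
    obtain ⟨s1, s2, hs⟩ := hinf
    have hlen : s1.length + (sep.length + s2.length) = i := by
      have := congrArg List.length hs
      simpa [List.length_take, Nat.min_eq_left hi_le] using this
    have hspos : 0 < sep.length := List.length_pos_iff.mpr hsep
    refine hmin s1.length (by omega) ?_
    have ht' : t.drop s1.length = sep ++ (s2 ++ t.drop i) := by
      conv_lhs => rw [← List.take_append_drop i t, ← hs]
      rw [List.append_assoc, List.append_assoc, List.drop_left]
    rw [ht']
    exact List.prefix_append _ _

-- A's per-part result (first-occurrence form)
def pvFmtPart (part : List Char) : Option (List Char) :=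
  let i := PySem.Chars.find part pvEND
  if i < 0 then none
  else
    let role := PySem.Chars.strip (part.take i.toNat)
    let rest := part.drop (i.toNat + pvEND.length)
    let j := PySem.Chars.find rest pvEOT
    let content := PySem.Chars.strip (if j < 0 then rest else rest.take j.toNat)
    if content = [] then none
    else some (((pvPrefixes.get? role).getD (pyCapitalize role)) ++ ": ".toList ++ content)

-- ---- the segment lemmas: one <|start_header_id|> segment produces exactly pvFmtPart ----

lemma pv_seg_end {t : List Char} (ht : ¬ pvSTART <:+: t) (role : List Char) (saw : Bool)
    (lines : List (List Char)) :
    scanB t 1 role [] saw lines = (lines ++ (pvFmtPart t).toList, saw) := by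
  by_cases hE : 0 ≤ PySem.Chars.find t pvEND
  · obtain ⟨hdec, hnin⟩ := pv_find_decomp (by decide : pvEND ≠ []) hE
    have ht1S : ¬ pvSTART <:+: t.take (PySem.Chars.find t pvEND).toNat :=
      fun hi => ht (hi.trans (List.take_prefix _ t).isInfix)
    have ht2S : ¬ pvSTART <:+: t.drop ((PySem.Chars.find t pvEND).toNat + pvEND.length) :=
      fun hi => ht (hi.trans (List.drop_suffix _ t).isInfix)
    conv_lhs => rw [hdec, List.append_assoc]
    rw [pv_scan1_text ht1S hnin (Or.inr ⟨pvEND, by decide, _, rfl⟩)]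
    rw [List.nil_append, pv_scan_end_step]
    by_cases hT : 0 ≤ PySem.Chars.find (t.drop ((PySem.Chars.find t pvEND).toNat + pvEND.length)) pvEOT
    · obtain ⟨hdec2, hnin2⟩ := pv_find_decomp (by decide : pvEOT ≠ []) hT
      have ht2aS : ¬ pvSTART <:+: (t.drop ((PySem.Chars.find t pvEND).toNat + pvEND.length)).take
          (PySem.Chars.find (t.drop ((PySem.Chars.find t pvEND).toNat + pvEND.length)) pvEOT).toNat :=
        fun hi => ht2S (hi.trans (List.take_prefix _ _).isInfix)
      have ht2bS : ¬ pvSTART <:+: (t.drop ((PySem.Chars.find t pvEND).toNat + pvEND.length)).drop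
          ((PySem.Chars.find (t.drop ((PySem.Chars.find t pvEND).toNat + pvEND.length)) pvEOT).toNat + pvEOT.length) :=
        fun hi => ht2S (hi.trans (List.drop_suffix _ _).isInfix)
      conv_lhs => rw [hdec2, List.append_assoc]
      rw [pv_scan2_text ht2aS hnin2 (Or.inr ⟨pvEOT, by decide, _, rfl⟩)]
      rw [List.nil_append, pv_scan_eot_step]
      conv_lhs => rw [show (t.drop ((PySem.Chars.find t pvEND).toNat + pvEND.length)).drop
          ((PySem.Chars.find (t.drop ((PySem.Chars.find t pvEND).toNat + pvEND.length)) pvEOT).toNat + pvEOT.length)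
          = (t.drop ((PySem.Chars.find t pvEND).toNat + pvEND.length)).drop
          ((PySem.Chars.find (t.drop ((PySem.Chars.find t pvEND).toNat + pvEND.length)) pvEOT).toNat + pvEOT.length) ++ []
          from (List.append_nil _).symm]
      rw [pv_scan0_text ht2bS (Or.inl rfl)]
      rw [pv_scanB_nil]
      simp only [if_neg (by simp : ¬ (0 : Nat) = 2)]
      simp only [pvEmit, pvFmtPart]
      rw [if_neg (by omega : ¬ PySem.Chars.find t pvEND < 0)]
      rw [if_neg (by omega : ¬ PySem.Chars.find (t.drop ((PySem.Chars.find t pvEND).toNat + pvEND.length)) pvEOT < 0)]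
      by_cases hc : PySem.Chars.strip ((t.drop ((PySem.Chars.find t pvEND).toNat + pvEND.length)).take
          (PySem.Chars.find (t.drop ((PySem.Chars.find t pvEND).toNat + pvEND.length)) pvEOT).toNat) = []
      · simp [hc]
      · simp [hc]
    · have hT' : ¬ pvEOT <:+: t.drop ((PySem.Chars.find t pvEND).toNat + pvEND.length) := by
        rw [← PySem.Chars.find_eq_neg_one_iff]
        have := PySem.Chars.neg_one_le_find (t.drop ((PySem.Chars.find t pvEND).toNat + pvEND.length)) pvEOT
        omega
      conv_lhs => rw [show t.drop ((PySem.Chars.find t pvEND).toNat + pvEND.length)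
          = t.drop ((PySem.Chars.find t pvEND).toNat + pvEND.length) ++ []
          from (List.append_nil _).symm]
      rw [pv_scan2_text ht2S hT' (Or.inl rfl)]
      rw [pv_scanB_nil]
      simp only [List.nil_append]
      simp only [pvEmit, pvFmtPart]
      rw [if_neg (by omega : ¬ PySem.Chars.find t pvEND < 0)]
      rw [if_pos (by omega : PySem.Chars.find (t.drop ((PySem.Chars.find t pvEND).toNat + pvEND.length)) pvEOT < 0)]
      by_cases hc : PySem.Chars.strip (t.drop ((PySem.Chars.find t pvEND).toNat + pvEND.length)) = []
      · simp [hc]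
      · simp [hc]
  · have hE' : ¬ pvEND <:+: t := by
      rw [← PySem.Chars.find_eq_neg_one_iff]
      have := PySem.Chars.neg_one_le_find t pvEND
      omega
    conv_lhs => rw [show t = t ++ [] from (List.append_nil t).symm]
    rw [pv_scan1_text ht hE' (Or.inl rfl)]
    rw [pv_scanB_nil]
    simp [pvFmtPart, if_pos (by omega : PySem.Chars.find t pvEND < 0)]

lemma pv_seg_step {t : List Char} (ht : ¬ pvSTART <:+: t) (r role : List Char) (saw : Bool)
    (lines : List (List Char)) :
    scanB (t ++ pvSTART ++ r) 1 role [] saw lines =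
      scanB r 1 role [] true (lines ++ (pvFmtPart t).toList) := by
  rw [List.append_assoc]
  by_cases hE : 0 ≤ PySem.Chars.find t pvEND
  · obtain ⟨hdec, hnin⟩ := pv_find_decomp (by decide : pvEND ≠ []) hE
    have ht1S : ¬ pvSTART <:+: t.take (PySem.Chars.find t pvEND).toNat :=
      fun hi => ht (hi.trans (List.take_prefix _ t).isInfix)
    have ht2S : ¬ pvSTART <:+: t.drop ((PySem.Chars.find t pvEND).toNat + pvEND.length) :=
      fun hi => ht (hi.trans (List.drop_suffix _ t).isInfix)
    conv_lhs => rw [hdec, List.append_assoc, List.append_assoc]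
    rw [pv_scan1_text ht1S hnin (Or.inr ⟨pvEND, by decide, _, rfl⟩)]
    rw [List.nil_append, pv_scan_end_step]
    rw [← List.append_assoc]
    by_cases hT : 0 ≤ PySem.Chars.find (t.drop ((PySem.Chars.find t pvEND).toNat + pvEND.length)) pvEOT
    · obtain ⟨hdec2, hnin2⟩ := pv_find_decomp (by decide : pvEOT ≠ []) hT
      have ht2aS : ¬ pvSTART <:+: (t.drop ((PySem.Chars.find t pvEND).toNat + pvEND.length)).take
          (PySem.Chars.find (t.drop ((PySem.Chars.find t pvEND).toNat + pvEND.length)) pvEOT).toNat :=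
        fun hi => ht2S (hi.trans (List.take_prefix _ _).isInfix)
      have ht2bS : ¬ pvSTART <:+: (t.drop ((PySem.Chars.find t pvEND).toNat + pvEND.length)).drop
          ((PySem.Chars.find (t.drop ((PySem.Chars.find t pvEND).toNat + pvEND.length)) pvEOT).toNat + pvEOT.length) :=
        fun hi => ht2S (hi.trans (List.drop_suffix _ _).isInfix)
      conv_lhs => rw [show (t.drop ((PySem.Chars.find t pvEND).toNat + pvEND.length)) ++ pvSTART ++ r
          = ((t.drop ((PySem.Chars.find t pvEND).toNat + pvEND.length)).take
              (PySem.Chars.find (t.drop ((PySem.Chars.find t pvEND).toNat + pvEND.length)) pvEOT).toNat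
              ++ pvEOT ++ (t.drop ((PySem.Chars.find t pvEND).toNat + pvEND.length)).drop
              ((PySem.Chars.find (t.drop ((PySem.Chars.find t pvEND).toNat + pvEND.length)) pvEOT).toNat + pvEOT.length))
              ++ pvSTART ++ r from by rw [← hdec2]]
      conv_lhs => rw [List.append_assoc, List.append_assoc, List.append_assoc]
      rw [pv_scan2_text ht2aS hnin2 (Or.inr ⟨pvEOT, by decide, _, rfl⟩)]
      rw [List.nil_append, pv_scan_eot_step]
      rw [pv_scan0_text ht2bS (Or.inr ⟨pvSTART, by decide, r, rfl⟩)]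
      rw [pv_scan_start_step]
      simp only [if_neg (by simp : ¬ (0 : Nat) = 2)]
      rw [pv_scan1_role_irrel r _ role]
      simp only [pvEmit, pvFmtPart]
      rw [if_neg (by omega : ¬ PySem.Chars.find t pvEND < 0)]
      rw [if_neg (by omega : ¬ PySem.Chars.find (t.drop ((PySem.Chars.find t pvEND).toNat + pvEND.length)) pvEOT < 0)]
      by_cases hc : PySem.Chars.strip ((t.drop ((PySem.Chars.find t pvEND).toNat + pvEND.length)).take
          (PySem.Chars.find (t.drop ((PySem.Chars.find t pvEND).toNat + pvEND.length)) pvEOT).toNat) = []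
      · simp [hc]
      · simp [hc]
    · have hT' : ¬ pvEOT <:+: t.drop ((PySem.Chars.find t pvEND).toNat + pvEND.length) := by
        rw [← PySem.Chars.find_eq_neg_one_iff]
        have := PySem.Chars.neg_one_le_find (t.drop ((PySem.Chars.find t pvEND).toNat + pvEND.length)) pvEOT
        omega
      rw [List.append_assoc]
      rw [pv_scan2_text ht2S hT' (Or.inr ⟨pvSTART, by decide, r, rfl⟩)]
      rw [List.nil_append, pv_scan_start_step]
      rw [pv_scan1_role_irrel r _ role]
      simp only [pvEmit, pvFmtPart]
      rw [if_neg (by omega : ¬ PySem.Chars.find t pvEND < 0)]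
      rw [if_pos (by omega : PySem.Chars.find (t.drop ((PySem.Chars.find t pvEND).toNat + pvEND.length)) pvEOT < 0)]
      by_cases hc : PySem.Chars.strip (t.drop ((PySem.Chars.find t pvEND).toNat + pvEND.length)) = []
      · simp [hc]
      · simp [hc]
  · have hE' : ¬ pvEND <:+: t := by
      rw [← PySem.Chars.find_eq_neg_one_iff]
      have := PySem.Chars.neg_one_le_find t pvEND
      omega
    rw [pv_scan1_text ht hE' (Or.inr ⟨pvSTART, by decide, r, rfl⟩)]
    rw [List.nil_append, pv_scan_start_step]
    simp only [if_neg (by simp : ¬ (1 : Nat) = 2)]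
    simp [pvFmtPart, if_pos (by omega : PySem.Chars.find t pvEND < 0)]

-- ---- characterisation of PySem.Chars.splitOn by the first occurrence ----

def pvSplitRef (sep : List Char) (hsep : sep ≠ []) (l : List Char) : List (List Char) :=
  if _h : PySem.Chars.find l sep < 0 then [l]
  else (l.take (PySem.Chars.find l sep).toNat) ::
    pvSplitRef sep hsep (l.drop ((PySem.Chars.find l sep).toNat + sep.length))
termination_by l.length
decreasing_by
  have h0 : 0 ≤ PySem.Chars.find l sep := by omega
  have h3 : sep <:+: l := (PySem.Chars.find_nonneg_iff _ _).1 h0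
  have h4 : sep.length ≤ l.length := h3.length_le
  have h2 : sep.length ≠ 0 := by simpa using hsep
  simp only [List.length_drop]
  omega

-- ---- previous find/splitOnMax facts used on both sides ----

lemma pv_find_nil {sep : List Char} (h : sep ≠ []) : PySem.Chars.find [] sep = -1 := by
  rw [PySem.Chars.find_eq_neg_one_iff]
  simpa [List.infix_nil] using h

lemma pv_find_cons_of_prefix {sep : List Char} {c : Char} {rest : List Char}
    (h : sep <+: (c :: rest)) : PySem.Chars.find (c :: rest) sep = 0 := by
  have h0 : 0 ≤ PySem.Chars.find (c :: rest) sep :=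
    (PySem.Chars.find_nonneg_iff _ _).2 h.isInfix
  obtain ⟨hpre, hmin⟩ := PySem.Chars.find_spec h0
  by_contra hne
  have h1 : 1 ≤ PySem.Chars.find (c :: rest) sep := by omega
  exact hmin 0 (by omega) (by simpa using h)

lemma pv_find_cons_of_not_prefix {sep : List Char} {c : Char} {rest : List Char}
    (h : ¬ sep <+: (c :: rest)) :
    PySem.Chars.find (c :: rest) sep =
      if PySem.Chars.find rest sep = -1 then -1 else PySem.Chars.find rest sep + 1 := by
  by_cases hin : sep <:+: rest
  · have hm : 0 ≤ PySem.Chars.find rest sep := (PySem.Chars.find_nonneg_iff _ _).2 hin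
    have hn : 0 ≤ PySem.Chars.find (c :: rest) sep :=
      (PySem.Chars.find_nonneg_iff _ _).2 (List.infix_cons_iff.2 (Or.inr hin))
    obtain ⟨hpreN, hminN⟩ := PySem.Chars.find_spec hn
    obtain ⟨hpreM, hminM⟩ := PySem.Chars.find_spec hm
    set n := (PySem.Chars.find (c :: rest) sep).toNat with hndef
    set m := (PySem.Chars.find rest sep).toNat with hmdef
    have hnpos : 0 < n := by
      by_contra hz
      have : n = 0 := Nat.eq_zero_of_not_pos hz
      rw [this] at hpreN
      exact h (by simpa using hpreN)
    have h1 : sep <+: rest.drop (n - 1) := by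
      obtain ⟨k, hk⟩ : ∃ k, n = k + 1 := ⟨n - 1, by omega⟩
      have : (c :: rest).drop n = rest.drop (n - 1) := by rw [hk]; simp
      rwa [this] at hpreN
    have h2 : sep <+: (c :: rest).drop (m + 1) := by simpa using hpreM
    have hle1 : m ≤ n - 1 := by
      by_contra hlt
      exact hminM (n - 1) (by omega) h1
    have hle2 : n ≤ m + 1 := by
      by_contra hlt
      exact hminN (m + 1) (by omega) h2
    have hne : PySem.Chars.find rest sep ≠ -1 := by omega
    rw [if_neg hne]
    omega
  · have h1 : PySem.Chars.find rest sep = -1 := (PySem.Chars.find_eq_neg_one_iff _ _).2 hin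
    have h2 : PySem.Chars.find (c :: rest) sep = -1 := by
      rw [PySem.Chars.find_eq_neg_one_iff]
      intro hinf
      rcases List.infix_cons_iff.1 hinf with hp | hi
      · exact h hp
      · exact hin hi
    rw [if_pos h1, h2]

-- splitOn.go computes pvSplitRef, with the current piece prefixed into the head
lemma pv_modifyHead_id (xs : List (List Char)) :
    xs.modifyHead (fun x => x) = xs := by
  cases xs <;> simp

lemma pv_go_split {sep : List Char} (hsep : sep ≠ []) :
    ∀ (fuel : Nat) (l cur : List Char) (acc : List (List Char)), l.length < fuel →
    PySem.Chars.splitOn.go sep fuel l cur acc =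
      acc.reverse ++ ((pvSplitRef sep hsep l).modifyHead (fun x => cur.reverse ++ x)) := by
  intro fuel
  induction fuel with
  | zero => intro l cur acc h; omega
  | succ k ih =>
    intro l cur acc h
    cases l with
    | nil =>
      rw [PySem.Chars.splitOn.go]
      · rw [pvSplitRef, dif_pos (by rw [pv_find_nil hsep]; omega)]
        simp
      · omega
    | cons c rest =>
      rw [PySem.Chars.splitOn.go]
      by_cases hp : sep.isPrefixOf (c :: rest)
      · rw [if_pos hp]
        have hkl : (List.drop sep.length (c :: rest)).length < k := by
          have hsl : 0 < sep.length := List.length_pos_iff.mpr hsep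
          have hle : sep.length ≤ (c :: rest).length :=
            (List.isPrefixOf_iff_prefix.1 hp).length_le
          simp only [List.length_drop]
          simp only [List.length_cons] at h ⊢
          omega
        rw [ih _ [] _ hkl]
        have hfind := pv_find_cons_of_prefix (List.isPrefixOf_iff_prefix.1 hp)
        conv_rhs => rw [pvSplitRef]
        rw [dif_neg (by rw [hfind]; omega)]
        rw [hfind]
        simp [pv_modifyHead_id]
      · rw [if_neg hp]
        rw [ih rest (c :: cur) acc (by simpa using Nat.lt_of_succ_lt_succ h)]
        have hfind := pv_find_cons_of_not_prefix (fun hpre => hp (List.isPrefixOf_iff_prefix.2 hpre))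
        conv_rhs => rw [pvSplitRef]
        by_cases hm : PySem.Chars.find rest sep = -1
        · rw [dif_pos (by rw [hfind, if_pos hm]; omega)]
          rw [pvSplitRef, dif_pos (by rw [hm]; omega)]
          simp
        · have hm0 : 0 ≤ PySem.Chars.find rest sep := by
            have := PySem.Chars.neg_one_le_find rest sep; omega
          rw [dif_neg (by rw [hfind, if_neg hm]; omega)]
          rw [pvSplitRef, dif_neg (by omega)]
          rw [hfind, if_neg hm]
          have ht : (PySem.Chars.find rest sep + 1).toNat = (PySem.Chars.find rest sep).toNat + 1 := by
            omega
          rw [ht, show (PySem.Chars.find rest sep).toNat + 1 + sep.length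
                = ((PySem.Chars.find rest sep).toNat + sep.length) + 1 from by omega]
          simp [List.take_succ_cons, List.drop_succ_cons]

lemma pv_splitOn_eq_ref {sep : List Char} (hsep : sep ≠ []) (l : List Char) :
    PySem.Chars.splitOn l sep = pvSplitRef sep hsep l := by
  rw [PySem.Chars.splitOn, pv_go_split hsep (l.length + 1) l [] [] (by omega)]
  simp [pv_modifyHead_id]

-- splitOnMax.go with maxsplit exhausted keeps the remainder as one piece
lemma pv_go_m0 (sep : List Char) (fuel : Nat) (l cur : List Char) (acc : List (List Char)) :
    PySem.Chars.splitOnMax.go sep fuel 0 l cur acc = ((cur.reverse ++ l) :: acc).reverse := by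
  cases fuel with
  | zero => rw [PySem.Chars.splitOnMax.go]
  | succ k =>
    cases l with
    | nil =>
      rw [PySem.Chars.splitOnMax.go]
      · simp
      · omega
    | cons c rest => rw [PySem.Chars.splitOnMax.go]; simp

-- splitOnMax.go with maxsplit 1: split at the first occurrence of sep, if any
lemma pv_go_m1 {sep : List Char} (hsep : sep ≠ []) :
    ∀ (fuel : Nat) (l cur : List Char) (acc : List (List Char)), l.length < fuel →
    PySem.Chars.splitOnMax.go sep fuel 1 l cur acc =
      acc.reverse ++
        (if PySem.Chars.find l sep < 0 then [cur.reverse ++ l]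
         else [cur.reverse ++ l.take (PySem.Chars.find l sep).toNat,
               l.drop ((PySem.Chars.find l sep).toNat + sep.length)]) := by
  intro fuel
  induction fuel with
  | zero => intro l cur acc h; omega
  | succ k ih =>
    intro l cur acc h
    cases l with
    | nil =>
      rw [PySem.Chars.splitOnMax.go]
      · rw [if_pos (by rw [pv_find_nil hsep]; omega)]
        simp
      · omega
    | cons c rest =>
      rw [PySem.Chars.splitOnMax.go]
      simp only [if_neg (by omega : ¬ (1 : Nat) = 0)]
      by_cases hp : sep.isPrefixOf (c :: rest)
      · rw [if_pos hp, pv_go_m0]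
        have hfind := pv_find_cons_of_prefix (List.isPrefixOf_iff_prefix.1 hp)
        rw [if_neg (by rw [hfind]; omega)]
        rw [hfind]
        simp
      · rw [if_neg hp]
        rw [ih rest (c :: cur) acc (by simpa using Nat.lt_of_succ_lt_succ h)]
        have hfind := pv_find_cons_of_not_prefix (fun hpre => hp (List.isPrefixOf_iff_prefix.2 hpre))
        rw [hfind]
        by_cases hm : PySem.Chars.find rest sep = -1
        · rw [if_pos hm, if_pos (by omega : PySem.Chars.find rest sep < 0),
              if_pos (by omega : (-1 : Int) < 0)]
          simp
        · have hm0 : 0 ≤ PySem.Chars.find rest sep := by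
            have := PySem.Chars.neg_one_le_find rest sep; omega
          rw [if_neg hm, if_neg (by omega : ¬ PySem.Chars.find rest sep < 0),
              if_neg (by omega : ¬ PySem.Chars.find rest sep + 1 < 0)]
          have ht : (PySem.Chars.find rest sep + 1).toNat = (PySem.Chars.find rest sep).toNat + 1 := by
            omega
          rw [ht, show (PySem.Chars.find rest sep).toNat + 1 + sep.length
                = ((PySem.Chars.find rest sep).toNat + sep.length) + 1 from by omega]
          simp [List.take_succ_cons, List.drop_succ_cons]

-- Python s.split(sep, 1): at most one split, at the first occurrence
lemma pv_splitOnMax_one {sep : List Char} (hsep : sep ≠ []) (s : List Char) :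
    PySem.Chars.splitOnMax s sep 1 =
      (if PySem.Chars.find s sep < 0 then [s]
       else [s.take (PySem.Chars.find s sep).toNat,
             s.drop ((PySem.Chars.find s sep).toNat + sep.length)]) := by
  rw [PySem.Chars.splitOnMax]
  rw [if_neg (by omega : ¬ (1 : Int) < 0)]
  have : (1 : Int).toNat = 1 := rfl
  rw [this, pv_go_m1 hsep (s.length + 1) s [] [] (by omega)]
  simp

-- dict lookup with default = A's role if-chain
lemma pv_prefix_eq (role : List Char) :
    ((pvPrefixes.get? role).getD (pyCapitalize role)) =
      (if role = "user".toList then "User".toList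
       else if role = "assistant".toList then "Assistant".toList
       else if role = "system".toList then "System".toList
       else pyCapitalize role) := by
  by_cases h1 : role = "user".toList
  · subst h1; rfl
  · by_cases h2 : role = "assistant".toList
    · subst h2; rfl
    · by_cases h3 : role = "system".toList
      · subst h3; rfl
      · have e1 : ("user".toList == role) = false := beq_eq_false_iff_ne.2 (Ne.symm h1)
        have e2 : ("assistant".toList == role) = false := beq_eq_false_iff_ne.2 (Ne.symm h2)
        have e3 : ("system".toList == role) = false := beq_eq_false_iff_ne.2 (Ne.symm h3)
        simp only [pvPrefixes, PySem.Dict.get?, List.find?]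
        rw [e1, e2, e3]
        simp only [Option.map, Option.getD]
        rw [if_neg h1, if_neg h2, if_neg h3]

-- A's loop body appends exactly what pvFmtPart yields
lemma pv_step_eq (lines : List (List Char)) (part : List Char) :
    pvStepA lines part =
      match pvFmtPart part with
      | none => lines
      | some x => lines ++ [x] := by
  by_cases hI : PySem.Chars.isIn pvEND part = false
  · have hf : PySem.Chars.find part pvEND = -1 :=
      (PySem.Chars.find_eq_neg_one_iff _ _).2 ((PySem.Chars.isIn_eq_false_iff _ _).1 hI)
    simp [pvStepA, pvFmtPart, hI, hf]
  · have hI' : PySem.Chars.isIn pvEND part = true := by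
      cases h : PySem.Chars.isIn pvEND part
      · exact absurd h hI
      · rfl
    have hi0 : 0 ≤ PySem.Chars.find part pvEND :=
      (PySem.Chars.find_nonneg_iff _ _).2 ((PySem.Chars.isIn_iff_infix _ _).1 hI')
    have hTF : ¬ ((true : Bool) = false) := by simp
    have hnlt : ¬ PySem.Chars.find part pvEND < 0 := by omega
    have hOne := pv_splitOnMax_one (by decide : pvEND ≠ []) part
    rw [if_neg hnlt] at hOne
    simp only [pvStepA, pvFmtPart, hI', hOne, if_neg hTF, if_neg hnlt]
    generalize List.drop ((PySem.Chars.find part pvEND).toNat + pvEND.length) part = restp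
    by_cases hJ : PySem.Chars.isIn pvEOT restp = true
    · have hj0 : 0 ≤ PySem.Chars.find restp pvEOT :=
        (PySem.Chars.find_nonneg_iff _ _).2 ((PySem.Chars.isIn_iff_infix _ _).1 hJ)
      have hOne2 := pv_splitOnMax_one (by decide : pvEOT ≠ []) restp
      rw [if_neg (show ¬ PySem.Chars.find restp pvEOT < 0 by omega)] at hOne2
      simp only [hJ, hOne2, if_neg (show ¬ PySem.Chars.find restp pvEOT < 0 by omega)]
      by_cases hc : PySem.Chars.strip (restp.take (PySem.Chars.find restp pvEOT).toNat) = []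
      · simp [hc]
      · simp [hc, pv_prefix_eq]
    · have hJ' : PySem.Chars.isIn pvEOT restp = false := by
        cases h : PySem.Chars.isIn pvEOT restp
        · rfl
        · exact absurd h hJ
      have hjf : PySem.Chars.find restp pvEOT = -1 :=
        (PySem.Chars.find_eq_neg_one_iff _ _).2 ((PySem.Chars.isIn_eq_false_iff _ _).1 hJ')
      simp only [hJ', hjf, if_pos (show (-1 : Int) < 0 by omega)]
      by_cases hc : PySem.Chars.strip restp = []
      · simp [hc]
      · simp [hc, pv_prefix_eq]

lemma pv_foldl_eq (parts : List (List Char)) (lines : List (List Char)) :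
    parts.foldl pvStepA lines = lines ++ parts.filterMap pvFmtPart := by
  induction parts generalizing lines with
  | nil => simp
  | cons p t ih =>
    rw [List.foldl_cons, List.filterMap_cons, ih, pv_step_eq]
    cases h : pvFmtPart p <;> simp

-- ---- the main induction: the scan in mode 1 computes A's filterMap over the segments ----

lemma pv_main (r : List Char) (role : List Char) (lines : List (List Char)) :
    scanB r 1 role [] true lines =
      (lines ++ (pvSplitRef pvSTART (by decide) r).filterMap pvFmtPart, true) := by
  suffices h : ∀ (n : Nat) (r : List Char), r.length ≤ n → ∀ (role : List Char)
      (lines : List (List Char)),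
      scanB r 1 role [] true lines =
        (lines ++ (pvSplitRef pvSTART (by decide) r).filterMap pvFmtPart, true) from
    h r.length r le_rfl role lines
  intro n
  induction n with
  | zero =>
    intro r hr role lines
    have hnil : r = [] := List.length_eq_zero_iff.mp (Nat.le_zero.mp hr)
    subst hnil
    rw [pv_seg_end (by simp [List.infix_nil, pvSTART] : ¬ pvSTART <:+: ([] : List Char)) role true lines]
    rw [pvSplitRef, dif_pos (by rw [pv_find_nil (by decide : pvSTART ≠ [])]; omega)]
    cases h : pvFmtPart [] <;> simp [h]
  | succ k ih =>
    intro r hr role lines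
    by_cases hS : 0 ≤ PySem.Chars.find r pvSTART
    · obtain ⟨hdec, hnin⟩ := pv_find_decomp (by decide : pvSTART ≠ []) hS
      have hlen : (r.drop ((PySem.Chars.find r pvSTART).toNat + pvSTART.length)).length ≤ k := by
        have h19 : pvSTART.length = 19 := by decide
        have hinf : pvSTART <:+: r := (PySem.Chars.find_nonneg_iff _ _).1 hS
        have hle : pvSTART.length ≤ r.length := hinf.length_le
        simp only [List.length_drop]
        omega
      conv_lhs => rw [hdec]
      rw [pv_seg_step hnin _ role true lines]
      rw [ih _ hlen role _]
      conv_rhs => rw [pvSplitRef, dif_neg (by omega : ¬ PySem.Chars.find r pvSTART < 0)]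
      rw [List.filterMap_cons]
      cases pvFmtPart (r.take (PySem.Chars.find r pvSTART).toNat) <;> simp
    · have hS' : ¬ pvSTART <:+: r := by
        rw [← PySem.Chars.find_eq_neg_one_iff]
        have := PySem.Chars.neg_one_le_find r pvSTART
        omega
      rw [pv_seg_end hS' role true lines]
      rw [pvSplitRef, dif_pos (by omega : PySem.Chars.find r pvSTART < 0)]
      cases h : pvFmtPart r <;> simp [h]

-- ===== VERDICT (by name: the statement is the Claim_ definition above) =====
theorem build_context_block_from_prompt_spec : Claim_equal_build_context_block_from_prompt := by
  intro s _
  unfold Spec_build_context_block_from_prompt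
  unfold build_context_block_from_prompt build_context_block_from_prompt_alt
  by_cases h : PySem.Chars.isIn pvSTART s.toList = false
  · have hinf : ¬ pvSTART <:+: s.toList := (PySem.Chars.isIn_eq_false_iff _ _).1 h
    have hb : scanB s.toList 0 [] [] false [] = ([], false) := by
      conv_lhs => rw [show s.toList = s.toList ++ [] from (List.append_nil _).symm]
      rw [pv_scan0_text hinf (Or.inl rfl)]
      rw [pv_scanB_nil]
      simp
    simp [h, hb]
  · have hI : PySem.Chars.isIn pvSTART s.toList = true := by
      cases hx : PySem.Chars.isIn pvSTART s.toList
      · exact absurd hx h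
      · rfl
    have hS : 0 ≤ PySem.Chars.find s.toList pvSTART :=
      (PySem.Chars.find_nonneg_iff _ _).2 ((PySem.Chars.isIn_iff_infix _ _).1 hI)
    obtain ⟨hdec, hnin⟩ := pv_find_decomp (by decide : pvSTART ≠ []) hS
    have hb : scanB s.toList 0 [] [] false []
        = ((pvSplitRef pvSTART (by decide)
            (s.toList.drop ((PySem.Chars.find s.toList pvSTART).toNat + pvSTART.length))).filterMap
              pvFmtPart, true) := by
      conv_lhs => rw [hdec, List.append_assoc]
      rw [pv_scan0_text hnin (Or.inr ⟨pvSTART, by decide, _, rfl⟩)]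
      rw [pv_scan_start_step]
      simp only [if_neg (by simp : ¬ (0 : Nat) = 2)]
      rw [pv_main]
      simp
    have ha : PySem.Chars.splitOn s.toList pvSTART
        = s.toList.take (PySem.Chars.find s.toList pvSTART).toNat ::
          pvSplitRef pvSTART (by decide)
            (s.toList.drop ((PySem.Chars.find s.toList pvSTART).toNat + pvSTART.length)) := by
      rw [pv_splitOn_eq_ref (by decide : pvSTART ≠ [])]
      conv_lhs => rw [pvSplitRef, dif_neg (by omega : ¬ PySem.Chars.find s.toList pvSTART < 0)]
    simp only [h, hb, ha, List.drop_succ_cons, List.drop_zero]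
    rw [pv_foldl_eq]
    simp
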